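-- pv_equiv track=rewrite | github.com/maxjackson-lab/intercom-gamma-analyzer | src/agents/canny_topic_detection_agent.py | _fallback_keyword_classification
-- ===== SOURCE A (Python) =====
-- from typing import Dict, List, Optional, Any
--
-- def _fallback_keyword_classification(
--
--     post: Dict[str, Any],
--     taxonomy: Dict[str, Any]
-- ) -> str:
--     """
--     Fallback classification using keyword matching.
--
--     Returns:
--         Category name
--     """
--     # Combine title and details for matching
--     text = (post.get('title', '') + ' ' + post.get('details', '')).lower()
--
--     # Also check existing category
--     existing_category = post.get('category', '').lower()
--
--     # Score each taxonomy category
--     scores = {}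
--     for category, data in taxonomy.items():
--         score = 0
--         keywords = data.get('keywords', [])
--
--         # Check keyword matches
--         for keyword in keywords:
--             if keyword in text:
--                 score += 2
--             if keyword in existing_category:
--                 score += 3
--
--         # Check for category name in text
--         if category.lower() in text or category.lower() in existing_category:
--             score += 5
--
--         scores[category] = score
--
--     # Return category with highest score
--     if scores:
--         best_category = max(scores.items(), key=lambda x: x[1])
--         if best_category[1] > 0:
--             return best_category[0]
--
--     # Default to Feedback for feature requests
--     return 'Feedback'
-- ===== SOURCE B (Python) =====
-- from typing import Dict, List, Optional, Any
--
--
-- def _score(category, data, text, existing_category):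
--     keywords = data.get('keywords', [])
--     s = 2 * sum(kw in text for kw in keywords) + 3 * sum(kw in existing_category for kw in keywords)
--     if category.lower() in text or category.lower() in existing_category:
--         s += 5
--     return s
--
--
-- def _fallback_keyword_classification(
--     post: Dict[str, Any],
--     taxonomy: Dict[str, Any]
-- ) -> str:
--     text = (post.get('title', '') + ' ' + post.get('details', '')).lower()
--     existing_category = post.get('category', '').lower()
--
--     # rank all categories by score, descending; the stable sort keeps the
--     # first-listed category ahead of equal-scored later ones
--     ranked = sorted(((c, _score(c, d, text, existing_category)) for c, d in taxonomy.items()),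
--                     key=lambda p: p[1], reverse=True)
--     if ranked and ranked[0][1] > 0:
--         return ranked[0][0]
--     return 'Feedback'
-- ===== Notes on version B (the rewrite author's own statement) =====
-- stated objective: alternative
-- what changed: B scores each category arithmetically (2*count of keywords in text + 3*count in existing category + name bonus) instead of A's step-by-step accumulator, and replaces A's scores dict plus max() pass by one stable descending sort of all (category, score) pairs, taking the head (stability reproduces max's first-winner tie-break).
import Mathlib
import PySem

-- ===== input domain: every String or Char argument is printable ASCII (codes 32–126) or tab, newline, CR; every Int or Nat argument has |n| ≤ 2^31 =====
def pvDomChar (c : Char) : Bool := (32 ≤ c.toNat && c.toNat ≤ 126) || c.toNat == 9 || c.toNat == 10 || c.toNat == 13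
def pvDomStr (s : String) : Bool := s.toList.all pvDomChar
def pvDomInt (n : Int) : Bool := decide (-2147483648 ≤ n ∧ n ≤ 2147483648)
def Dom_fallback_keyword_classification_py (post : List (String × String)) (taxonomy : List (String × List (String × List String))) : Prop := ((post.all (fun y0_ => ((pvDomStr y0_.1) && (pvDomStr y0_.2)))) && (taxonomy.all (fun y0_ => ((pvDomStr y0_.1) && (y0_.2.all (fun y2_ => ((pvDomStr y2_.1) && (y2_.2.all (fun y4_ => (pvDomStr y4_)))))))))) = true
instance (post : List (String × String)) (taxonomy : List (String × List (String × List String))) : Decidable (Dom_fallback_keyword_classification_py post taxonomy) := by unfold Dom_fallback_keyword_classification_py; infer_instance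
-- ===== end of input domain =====

-- B replaces A's scores dict + max() pass by scoring via keyword counts and ranking all categories with one stable descending sort, taking the head (alternative decomposition, not faster).

-- ===== PORT A =====
def fallback_keyword_classification_py (post : List (String × String)) (taxonomy : List (String × List (String × List String))) : String :=
  let postD : PySem.Dict String String := PySem.Dict.mk post
  let text := PySem.Str.lower (postD.getD "title" "" ++ " " ++ postD.getD "details" "")
  let existing_category := PySem.Str.lower (postD.getD "category" "")
  let scores : PySem.Dict String Int :=
    taxonomy.foldl (fun scores cd =>
      let keywords := (PySem.Dict.mk cd.2).getD "keywords" []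
      let score : Int := keywords.foldl (fun score keyword =>
        let score := if PySem.Str.isIn keyword text then score + 2 else score
        if PySem.Str.isIn keyword existing_category then score + 3 else score) 0
      let score := if PySem.Str.isIn (PySem.Str.lower cd.1) text || PySem.Str.isIn (PySem.Str.lower cd.1) existing_category then score + 5 else score
      scores.insert cd.1 score) PySem.Dict.empty
  match PySem.List.max? scores.items (fun x => x.2) with
  | some best => if best.2 > 0 then best.1 else "Feedback"
  | none => "Feedback"

-- ===== PORT B =====
-- B's _score: 2 * (count of keywords in text) + 3 * (count in existing category) + name bonus
def pvScore (category : String) (data : List (String × List String)) (text existing_category : String) : Int :=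
  let keywords := (PySem.Dict.mk data).getD "keywords" []
  let s : Int := 2 * (keywords.countP (fun kw => PySem.Str.isIn kw text) : Int)
               + 3 * (keywords.countP (fun kw => PySem.Str.isIn kw existing_category) : Int)
  if PySem.Str.isIn (PySem.Str.lower category) text || PySem.Str.isIn (PySem.Str.lower category) existing_category then s + 5 else s

def fallback_keyword_classification_py_alt (post : List (String × String)) (taxonomy : List (String × List (String × List String))) : String :=
  let postD : PySem.Dict String String := PySem.Dict.mk post
  let text := PySem.Str.lower (postD.getD "title" "" ++ " " ++ postD.getD "details" "")
  let existing_category := PySem.Str.lower (postD.getD "category" "")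
  let ranked := PySem.List.sorted (taxonomy.map (fun cd => (cd.1, pvScore cd.1 cd.2 text existing_category))) (fun p => p.2) true
  match ranked with
  | b :: _ => if b.2 > 0 then b.1 else "Feedback"
  | [] => "Feedback"

-- ===== PRECONDITION & SPEC =====
-- Pre_ excludes taxonomy association lists with duplicate category keys: such a list does not arise from
-- any Python dict argument, and A's scores-dict overwrite order there is accidental.
def Pre_fallback_keyword_classification_py (post : List (String × String)) (taxonomy : List (String × List (String × List String))) : Prop :=
  (taxonomy.map (fun cd => cd.1)).Nodup
instance (post : List (String × String)) (taxonomy : List (String × List (String × List String))) : Decidable (Pre_fallback_keyword_classification_py post taxonomy) := by unfold Pre_fallback_keyword_classification_py; infer_instance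

def pvWitness_fallback_keyword_classification_py : (List (String × String)) × (List (String × List (String × List String))) :=
  ([("title", "bug in billing page"), ("category", "bugs")],
   [("Bugs", [("keywords", ["bug", "crash"])]), ("Feedback", [("keywords", ["idea"])])])

def Spec_fallback_keyword_classification_py (post : List (String × String)) (taxonomy : List (String × List (String × List String))) (out : String) : Prop := out = fallback_keyword_classification_py_alt post taxonomy
instance (post : List (String × String)) (taxonomy : List (String × List (String × List String))) (out : String) : Decidable (Spec_fallback_keyword_classification_py post taxonomy out) := by unfold Spec_fallback_keyword_classification_py; infer_instance

-- ===== CLAIM (what is proved, stated in full; the proofs are below) =====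
def Claim_equal_fallback_keyword_classification_py : Prop := ∀ (post : List (String × String)) (taxonomy : List (String × List (String × List String))), Dom_fallback_keyword_classification_py post taxonomy → Pre_fallback_keyword_classification_py post taxonomy → Spec_fallback_keyword_classification_py post taxonomy (fallback_keyword_classification_py post taxonomy)

-- ===== LEMMAS AND PROOFS =====

-- A's two-ifs keyword loop equals B's 2·count + 3·count formula.
lemma pv_inner_count (t e : String) (kws : List String) (init : Int) :
    kws.foldl (fun score keyword =>
        let score := if PySem.Str.isIn keyword t then score + 2 else score
        if PySem.Str.isIn keyword e then score + 3 else score) init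
    = init + 2 * (kws.countP (fun kw => PySem.Str.isIn kw t) : Int)
           + 3 * (kws.countP (fun kw => PySem.Str.isIn kw e) : Int) := by
  induction kws generalizing init with
  | nil => simp
  | cons k ks ih =>
    simp only [List.foldl_cons, List.countP_cons]
    rw [ih]
    split_ifs <;> push_cast <;> ring

-- A's per-category dict update inserts exactly B's pvScore
lemma pv_entry_eq (t e : String) (d : PySem.Dict String Int) (cd : String × List (String × List String)) :
    (let keywords := (PySem.Dict.mk cd.2).getD "keywords" []
     let score : Int := keywords.foldl (fun score keyword =>
        let score := if PySem.Str.isIn keyword t then score + 2 else score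
        if PySem.Str.isIn keyword e then score + 3 else score) 0
     let score := if PySem.Str.isIn (PySem.Str.lower cd.1) t || PySem.Str.isIn (PySem.Str.lower cd.1) e then score + 5 else score
     d.insert cd.1 score)
    = d.insert cd.1 (pvScore cd.1 cd.2 t e) := by
  unfold pvScore
  simp only [pv_inner_count, zero_add]

-- PySem.List.max? of a nonempty list, fold form (first maximal)
lemma pv_max?_cons {α : Type} (key : α → Int) (p : α) (tl : List α) :
    PySem.List.max? (p :: tl) key
    = some (tl.foldl (fun m q => if key m < key q then q else m) p) := by
  have h : ∀ (l : List α) (m : α),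
      l.foldl (fun acc x => match acc with
        | none => some x
        | some m => if key m < key x then some x else some m) (some m)
      = some (l.foldl (fun m q => if key m < key q then q else m) m) := by
    intro l
    induction l with
    | nil => intro m; rfl
    | cons q tq ih =>
      intro m
      simp only [List.foldl_cons]
      by_cases hlt : key m < key q <;> simp [hlt, ih]
  simp only [PySem.List.max?, List.foldl_cons]
  exact h tl p

-- head of the stable reverse-sorted list, insertBy form: the first maximal element
lemma pv_ins_head {α : Type} (key : α → Int) (xs : List α) :
    ∀ (y : α) (ys : List α),
    (xs.foldl (fun acc x => PySem.List.insertBy (fun a b => decide (key b < key a)) x acc) (y :: ys)).head?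
    = some (xs.foldl (fun m q => if key m < key q then q else m) y) := by
  induction xs with
  | nil => intro y ys; rfl
  | cons x xt ih =>
    intro y ys
    simp only [List.foldl_cons]
    by_cases hlt : key y < key x
    · have hins : PySem.List.insertBy (fun a b => decide (key b < key a)) x (y :: ys)
          = x :: y :: ys := by
        simp [PySem.List.insertBy, hlt]
      rw [hins, ih x (y :: ys), if_pos hlt]
    · have hins : PySem.List.insertBy (fun a b => decide (key b < key a)) x (y :: ys)
          = y :: PySem.List.insertBy (fun a b => decide (key b < key a)) x ys := by
        simp [PySem.List.insertBy, hlt]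
      rw [hins, ih y _, if_neg hlt]

lemma pv_sorted_head {α : Type} (key : α → Int) (p : α) (tl : List α) :
    (PySem.List.sorted (p :: tl) key true).head?
    = some (tl.foldl (fun m q => if key m < key q then q else m) p) := by
  rw [PySem.List.sorted_rev_eq_foldl_insertBy]
  simp only [List.foldl_cons]
  have h0 : PySem.List.insertBy (fun a b => decide (key b < key a)) p ([] : List α) = [p] := rfl
  rw [h0]
  exact pv_ins_head key tl p []

-- A's max?-based tail equals B's sort-and-take-head tail
lemma pv_final (l : List (String × Int)) :
    (match PySem.List.max? l (fun x => x.2) with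
     | some best => if best.2 > 0 then best.1 else "Feedback"
     | none => "Feedback")
    = (match PySem.List.sorted l (fun p => p.2) true with
       | b :: _ => if b.2 > 0 then b.1 else "Feedback"
       | [] => "Feedback") := by
  cases l with
  | nil => rfl
  | cons p tl =>
    rw [pv_max?_cons]
    have hh := pv_sorted_head (fun p : String × Int => p.2) p tl
    cases hs : PySem.List.sorted (p :: tl) (fun p : String × Int => p.2) true with
    | nil => rw [hs] at hh; simp at hh
    | cons b rest =>
      rw [hs] at hh
      simp only [List.head?] at hh
      cases hh
      rfl

-- ===== VERDICT (by name: the statement is the Claim_ definition above) =====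
theorem fallback_keyword_classification_py_spec : Claim_equal_fallback_keyword_classification_py := by
  intro post taxonomy _ hpre
  unfold Spec_fallback_keyword_classification_py
  unfold fallback_keyword_classification_py fallback_keyword_classification_py_alt
  simp only []
  set t := PySem.Str.lower ((PySem.Dict.mk post).getD "title" "" ++ " " ++ (PySem.Dict.mk post).getD "details" "") with ht
  set e := PySem.Str.lower ((PySem.Dict.mk post).getD "category" "") with he
  clear_value t e
  clear ht he
  have hfold : taxonomy.foldl (fun scores cd =>
      let keywords := (PySem.Dict.mk cd.2).getD "keywords" []
      let score : Int := keywords.foldl (fun score keyword =>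
        let score := if PySem.Str.isIn keyword t then score + 2 else score
        if PySem.Str.isIn keyword e then score + 3 else score) 0
      let score := if PySem.Str.isIn (PySem.Str.lower cd.1) t || PySem.Str.isIn (PySem.Str.lower cd.1) e then score + 5 else score
      scores.insert cd.1 score) PySem.Dict.empty
    = taxonomy.foldl (fun scores cd => scores.insert cd.1 (pvScore cd.1 cd.2 t e)) PySem.Dict.empty := by
    apply List.foldl_ext
    intro d cd _
    exact pv_entry_eq t e d cd
  rw [hfold]
  have hitems := PySem.Dict.items_foldl_insert_fresh taxonomy (fun cd => cd.1)
      (fun cd => pvScore cd.1 cd.2 t e) PySem.Dict.empty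
      (fun a _ => PySem.Dict.contains_empty _) hpre
  rw [hitems]
  simp only [PySem.Dict.empty, List.nil_append]
  exact pv_final _
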